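-- pv_equiv track=rewrite | github.com/ReznovLee/radar | src/main.py | calculate_total_radar_switches
-- ===== SOURCE A (Python) =====
-- from typing import Dict, List, Optional # 新增导入
--
-- def calculate_total_radar_switches(assignment_history: List[Dict]) -> int:
--     """
--     计算单个算法分配历史中所有目标的总雷达切换次数。
--     切换定义为：在一个目标上，从一个非 null 的 radar_id 切换到另一个不同的非 null 的 radar_id。
--     """
--     if not assignment_history:
--         return 0
--
--     target_radar_sequences: Dict[str, List[Optional[int]]] = {}
--
--     all_target_ids_str = set()
--     for entry in assignment_history:
--         if 'assignments' in entry and entry['assignments']: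
--             for target_id_s in entry['assignments'].keys():
--                 all_target_ids_str.add(target_id_s)
--
--     if not all_target_ids_str:
--         return 0
--
--     for target_id_s in all_target_ids_str:
--         sequence: List[Optional[int]] = []
--         for entry in assignment_history:
--             assignment_details = entry['assignments'].get(target_id_s)
--             if assignment_details and 'radar_id' in assignment_details:
--                 sequence.append(assignment_details['radar_id'])
--             else:
--                 sequence.append(None)
--         target_radar_sequences[target_id_s] = sequence
--
--     total_switches_for_algo = 0
--     for target_id_s, radar_ids_sequence in target_radar_sequences.items():
--         switches_for_this_target = 0
--         last_radar_id_for_target: Optional[int] = None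
--
--         for current_radar_id in radar_ids_sequence:
--             if last_radar_id_for_target is not None and \
--                current_radar_id is not None and \
--                last_radar_id_for_target != current_radar_id:
--                 switches_for_this_target += 1
--
--             last_radar_id_for_target = current_radar_id
--
--         total_switches_for_algo += switches_for_this_target
--
--     return total_switches_for_algo
-- ===== SOURCE B (Python) =====
-- def calculate_total_radar_switches(assignment_history):
--     """Single pass over the history: for each target keep the index and radar_id of its
--     most recent non-null radar assignment; a switch is counted when a target gets a
--     radar in the entry immediately after one with a different radar."""
--     total = 0
--     last = {}  # target_id -> (entry_index, radar_id) of the most recent non-null radar assignment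
--     for i, entry in enumerate(assignment_history):
--         assignments = entry.get('assignments') or {}
--         for target_id in assignments:
--             details = assignments[target_id]
--             if details and 'radar_id' in details:
--                 radar_id = details['radar_id']
--                 prev = last.get(target_id)
--                 if prev is not None and prev[0] == i - 1 and prev[1] != radar_id:
--                     total += 1
--                 last[target_id] = (i, radar_id)
--     return total
-- ===== Notes on version B (the rewrite author's own statement) =====
-- stated objective: alternative
-- what changed: Replaces A's two-phase scheme (collect all target ids, then rebuild a full per-target radar sequence over the whole history for every target) with a single pass over the entries that keeps, per target, only the index and radar_id of its most recent non-null assignment and counts a switch when a target's radar changes between consecutive entries. (Pre_ excludes the histories on which A raises KeyError: a non-empty 'assignments' somewhere plus an entry lacking the 'assignments' key.)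
import Mathlib
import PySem

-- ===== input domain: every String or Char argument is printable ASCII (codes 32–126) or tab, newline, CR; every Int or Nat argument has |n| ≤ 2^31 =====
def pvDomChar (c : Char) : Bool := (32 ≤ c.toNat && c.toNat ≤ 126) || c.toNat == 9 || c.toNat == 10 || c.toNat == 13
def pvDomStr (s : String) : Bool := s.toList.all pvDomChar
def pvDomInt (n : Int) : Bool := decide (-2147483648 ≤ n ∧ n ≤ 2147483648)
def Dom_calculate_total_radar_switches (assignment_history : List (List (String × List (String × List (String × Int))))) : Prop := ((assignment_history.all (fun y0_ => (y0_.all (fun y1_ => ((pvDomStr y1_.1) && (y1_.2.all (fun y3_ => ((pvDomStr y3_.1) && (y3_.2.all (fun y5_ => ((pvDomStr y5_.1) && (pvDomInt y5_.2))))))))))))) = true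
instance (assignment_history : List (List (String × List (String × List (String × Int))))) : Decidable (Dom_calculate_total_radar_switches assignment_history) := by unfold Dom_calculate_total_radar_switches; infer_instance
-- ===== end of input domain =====

-- B replaces A's per-target rescan of the whole history by one pass that keeps, per
-- target, the index and radar id of its latest non-null assignment (objective: alternative).

-- ===== PORT A =====
def calculate_total_radar_switches (assignment_history : List (List (String × List (String × List (String × Int))))) : Int :=
  if assignment_history = [] then 0
  else
    -- all_target_ids_str: set of target ids over entries with a non-empty 'assignments' dict
    let allIds : PySem.Set String :=
      assignment_history.foldl (fun s entry =>
        match (PySem.Dict.mk entry).get? "assignments" with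
        | some asg => if asg ≠ [] then PySem.Set.update s (PySem.Dict.mk asg).keys else s
        | none => s) PySem.Set.empty
    if allIds = [] then 0
    else
      -- target_radar_sequences; entry['assignments'] raises KeyError when the key is
      -- missing — Pre_ excludes that, '.getD []' is exact on Pre_
      let seqs : PySem.Dict String (List (Option Int)) :=
        allIds.foldl (fun m tid =>
          let seq : List (Option Int) :=
            assignment_history.foldl (fun sq entry =>
              let asg := ((PySem.Dict.mk entry).get? "assignments").getD []
              match (PySem.Dict.mk asg).get? tid with
              | some details =>
                  if details ≠ [] ∧ (PySem.Dict.mk details).contains "radar_id" then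
                    -- details['radar_id']: contains guarantees some, '.getD 0' is exact
                    sq ++ [some (((PySem.Dict.mk details).get? "radar_id").getD 0)]
                  else sq ++ [none]
              | none => sq ++ [none]) []
          m.insert tid seq) PySem.Dict.empty
      seqs.items.foldl (fun total p =>
        let cnt : Int :=
          (p.2.foldl (fun (st : Option Int × Int) cur =>
            (cur, if st.1 ≠ none ∧ cur ≠ none ∧ st.1 ≠ cur then st.2 + 1 else st.2))
            (none, 0)).2
        total + cnt) 0

-- ===== PORT B =====
def calculate_total_radar_switches_alt (assignment_history : List (List (String × List (String × List (String × Int))))) : Int :=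
  ((PySem.List.enumerate assignment_history 0).foldl
    (fun (st : Int × PySem.Dict String (Int × Int)) ie =>
      let i := ie.1
      -- entry.get('assignments') or {}
      let assignments := ((PySem.Dict.mk ie.2).get? "assignments").getD []
      -- for target_id in assignments: iterate the dict's (deduplicated) keys
      (PySem.List.dedup (assignments.map (·.1))).foldl (fun st tid =>
        -- assignments[target_id]: tid is a key, so get? is some and '.getD []' is exact
        let details := ((PySem.Dict.mk assignments).get? tid).getD []
        if details ≠ [] ∧ (PySem.Dict.mk details).contains "radar_id" then
          let radar_id := ((PySem.Dict.mk details).get? "radar_id").getD 0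
          let total : Int :=
            match st.2.get? tid with
            | some prev => if prev.1 = i - 1 ∧ prev.2 ≠ radar_id then st.1 + 1 else st.1
            | none => st.1
          (total, st.2.insert tid (i, radar_id))
        else st) st)
    (0, PySem.Dict.empty)).1

-- ===== PRECONDITION & SPEC =====
-- Pre_ excludes exactly the histories on which A raises KeyError: some entry has a
-- non-empty 'assignments' dict while another entry lacks the 'assignments' key.
def Pre_calculate_total_radar_switches (assignment_history : List (List (String × List (String × List (String × Int))))) : Prop :=
  (∃ e ∈ assignment_history, ((PySem.Dict.mk e).get? "assignments").getD [] ≠ []) →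
    ∀ e ∈ assignment_history, (PySem.Dict.mk e).contains "assignments" = true
instance (assignment_history : List (List (String × List (String × List (String × Int))))) : Decidable (Pre_calculate_total_radar_switches assignment_history) := by unfold Pre_calculate_total_radar_switches; infer_instance

def pvWitness_calculate_total_radar_switches : (List (List (String × List (String × List (String × Int))))) :=
  [[("assignments", [("t1", [("radar_id", 1)])])], [("assignments", [("t1", [("radar_id", 2)])])]]

def Spec_calculate_total_radar_switches (assignment_history : List (List (String × List (String × List (String × Int))))) (out : Int) : Prop := out = calculate_total_radar_switches_alt assignment_history
instance (assignment_history : List (List (String × List (String × List (String × Int))))) (out : Int) : Decidable (Spec_calculate_total_radar_switches assignment_history out) := by unfold Spec_calculate_total_radar_switches; infer_instance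

-- ===== CLAIM (what is proved, stated in full; the proofs are below) =====
def Claim_equal_calculate_total_radar_switches : Prop := ∀ (assignment_history : List (List (String × List (String × List (String × Int))))), Dom_calculate_total_radar_switches assignment_history → Pre_calculate_total_radar_switches assignment_history → Spec_calculate_total_radar_switches assignment_history (calculate_total_radar_switches assignment_history)


-- ===== LEMMAS AND PROOFS =====

def pvAsg (e : List (String × List (String × List (String × Int)))) : List (String × List (String × Int)) :=
  ((PySem.Dict.mk e).get? "assignments").getD []

def pvG (e : List (String × List (String × List (String × Int)))) (t : String) : Option Int :=
  match (PySem.Dict.mk (pvAsg e)).get? t with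
  | some details =>
      if details ≠ [] ∧ (PySem.Dict.mk details).contains "radar_id" then
        some (((PySem.Dict.mk details).get? "radar_id").getD 0)
      else none
  | none => none

def pvInnerStep (assignments : List (String × List (String × Int))) (i : Int) (st : Int × PySem.Dict String (Int × Int)) (tid : String) : Int × PySem.Dict String (Int × Int) :=
  let details := ((PySem.Dict.mk assignments).get? tid).getD []
  if details ≠ [] ∧ (PySem.Dict.mk details).contains "radar_id" then
    let radar_id := ((PySem.Dict.mk details).get? "radar_id").getD 0
    let total : Int :=
      match st.2.get? tid with
      | some prev => if prev.1 = i - 1 ∧ prev.2 ≠ radar_id then st.1 + 1 else st.1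
      | none => st.1
    (total, st.2.insert tid (i, radar_id))
  else st

def pvInd (e : List (String × List (String × List (String × Int)))) (i : Int) (d : PySem.Dict String (Int × Int)) (t : String) : Int :=
  match pvG e t, d.get? t with
  | some rid, some prev => if prev.1 = i - 1 ∧ prev.2 ≠ rid then 1 else 0
  | _, _ => 0

theorem pvG_eq_none_of_not_mem (e : List (String × List (String × List (String × Int)))) (t : String)
    (h : t ∉ (pvAsg e).map (·.1)) : pvG e t = none := by
  unfold pvG
  have : (PySem.Dict.mk (pvAsg e)).get? t = none := by
    rw [PySem.Dict.get?_eq_none_iff_not_mem_keys]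
    simpa [PySem.Dict.keys] using h
  simp [this]


theorem pvInner_spec (e : List (String × List (String × List (String × Int)))) (i : Int) :
    ∀ (K : List String), K.Nodup → (∀ t ∈ K, t ∈ (pvAsg e).map (·.1)) →
    ∀ (n : Int) (d : PySem.Dict String (Int × Int)),
    ((K.foldl (pvInnerStep (pvAsg e) i) (n, d)).1 = n + (K.map (pvInd e i d)).sum) ∧
    (∀ t, (K.foldl (pvInnerStep (pvAsg e) i) (n, d)).2.get? t =
       match (if t ∈ K then pvG e t else none) with
       | some rid => some (i, rid)
       | none => d.get? t) := by
  intro K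
  induction K with
  | nil => intro _ _ n d; simp
  | cons t0 K' ih =>
    intro hnd hmem n d
    have ht0K : t0 ∈ (pvAsg e).map (·.1) := hmem t0 (by simp)
    obtain ⟨details0, hget⟩ : ∃ v, (PySem.Dict.mk (pvAsg e)).get? t0 = some v := by
      rcases h : (PySem.Dict.mk (pvAsg e)).get? t0 with _ | v
      · rw [PySem.Dict.get?_eq_none_iff_not_mem_keys] at h
        exact absurd (by simpa [PySem.Dict.keys] using ht0K) h
      · exact ⟨v, rfl⟩
    have hnd' : K'.Nodup := hnd.of_cons
    have ht0notK' : t0 ∉ K' := by simp at hnd; exact hnd.1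
    have hmem' : ∀ t ∈ K', t ∈ (pvAsg e).map (·.1) := fun t ht => hmem t (by simp [ht])
    by_cases hc : details0 ≠ [] ∧ (PySem.Dict.mk details0).contains "radar_id"
    · -- pvG e t0 = some rid0
      have hG : pvG e t0 = some (((PySem.Dict.mk details0).get? "radar_id").getD 0) := by
        unfold pvG; rw [hget]
        show (if details0 ≠ [] ∧ (PySem.Dict.mk details0).contains "radar_id" then
          some (((PySem.Dict.mk details0).get? "radar_id").getD 0) else none) = _
        rw [if_pos hc]
      have hstep : pvInnerStep (pvAsg e) i (n, d) t0 =
          (n + pvInd e i d t0, d.insert t0 (i, ((PySem.Dict.mk details0).get? "radar_id").getD 0)) := by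
        unfold pvInnerStep pvInd
        rw [hget, hG]
        simp only [Option.getD_some]
        show (if details0 ≠ [] ∧ (PySem.Dict.mk details0).contains "radar_id" then _ else _) = _
        rw [if_pos hc]
        rcases hd : d.get? t0 with _ | prev
        · simp
        · simp only []
          split_ifs <;> simp
      have hind' : ∀ t ∈ K', pvInd e i (d.insert t0 (i, ((PySem.Dict.mk details0).get? "radar_id").getD 0)) t = pvInd e i d t := by
        intro t ht
        have hne : t ≠ t0 := fun h => ht0notK' (h ▸ ht)
        unfold pvInd
        rw [PySem.Dict.get?_insert_of_ne _ _ hne]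
      obtain ⟨ih1, ih2⟩ := ih hnd' hmem' (n + pvInd e i d t0)
        (d.insert t0 (i, ((PySem.Dict.mk details0).get? "radar_id").getD 0))
      constructor
      · rw [List.foldl_cons, hstep, ih1, List.map_congr_left hind']
        simp [add_assoc]
      · intro t
        rw [List.foldl_cons, hstep, ih2 t]
        by_cases htK' : t ∈ K'
        · have hne : t ≠ t0 := fun h => ht0notK' (h ▸ htK')
          have hmemc : t ∈ t0 :: K' := by simp [htK']
          rw [if_pos htK', if_pos hmemc]
          rcases hGt : pvG e t with _ | rid
          · exact PySem.Dict.get?_insert_of_ne _ _ hne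
          · rfl
        · by_cases htt0 : t = t0
          · have hmemc : t ∈ t0 :: K' := by simp [htt0]
            rw [if_neg htK', if_pos hmemc, htt0, hG]
            simp [PySem.Dict.get?_insert_self]
          · have hmemc : t ∉ t0 :: K' := by simp [htt0, htK']
            rw [if_neg htK', if_neg hmemc]
            exact PySem.Dict.get?_insert_of_ne _ _ htt0
    · -- pvG e t0 = none
      have hG : pvG e t0 = none := by
        unfold pvG; rw [hget]
        show (if details0 ≠ [] ∧ (PySem.Dict.mk details0).contains "radar_id" then
          some (((PySem.Dict.mk details0).get? "radar_id").getD 0) else none) = _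
        rw [if_neg hc]
      have hstep : pvInnerStep (pvAsg e) i (n, d) t0 = (n, d) := by
        unfold pvInnerStep; rw [hget]
        show (if details0 ≠ [] ∧ (PySem.Dict.mk details0).contains "radar_id" then _ else (n, d)) = (n, d)
        rw [if_neg hc]
      have hind0 : pvInd e i d t0 = 0 := by
        unfold pvInd; rw [hG]
      obtain ⟨ih1, ih2⟩ := ih hnd' hmem' n d
      constructor
      · rw [List.foldl_cons, hstep, ih1]
        simp [hind0]
      · intro t
        rw [List.foldl_cons, hstep, ih2 t]
        by_cases htK' : t ∈ K'
        · simp [htK']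
        · by_cases htt0 : t = t0
          · subst htt0; simp [htK', hG]
          · simp [htK', htt0]

def pvScan (s : List (Option Int)) : Option Int × Int :=
  s.foldl (fun (st : Option Int × Int) cur =>
    (cur, if st.1 ≠ none ∧ cur ≠ none ∧ st.1 ≠ cur then st.2 + 1 else st.2)) (none, 0)

def pvBInd (a x : Option Int) : Int := if a ≠ none ∧ x ≠ none ∧ a ≠ x then 1 else 0

def pvS (ah : List (List (String × List (String × List (String × Int))))) : PySem.Set String :=
  ah.foldl (fun s e => PySem.Set.update s ((pvAsg e).map (·.1))) []

def pvLast (ah : List (List (String × List (String × List (String × Int))))) (t : String) : Option (Int × Int) :=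
  (PySem.List.enumerate ah 0).foldl
    (fun acc ie => match pvG ie.2 t with | some r => some (ie.1, r) | none => acc) none

def pvSum (ah : List (List (String × List (String × List (String × Int))))) : Int :=
  ((pvS ah).map (fun t => (pvScan (ah.map (fun e => pvG e t))).2)).sum

theorem pvScan_append (s : List (Option Int)) (x : Option Int) :
    pvScan (s ++ [x]) = (x, (pvScan s).2 + pvBInd (pvScan s).1 x) := by
  unfold pvScan pvBInd
  rw [List.foldl_append]
  simp only [List.foldl_cons, List.foldl_nil, Prod.mk.injEq]
  refine ⟨trivial, ?_⟩
  split_ifs <;> omega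

theorem pvLast_append (P : List (List (String × List (String × List (String × Int)))))
    (e : List (String × List (String × List (String × Int)))) (t : String) :
    pvLast (P ++ [e]) t =
      match pvG e t with
      | some r => some ((P.length : Int), r)
      | none => pvLast P t := by
  unfold pvLast
  rw [PySem.List.enumerate_append, List.foldl_append]
  simp only [PySem.List.enumerate_cons, PySem.List.enumerate_nil, List.foldl_cons, List.foldl_nil, zero_add]

theorem pvLast_bounds (P : List (List (String × List (String × List (String × Int))))) (t : String) :
    ∀ p, pvLast P t = some p → 0 ≤ p.1 ∧ p.1 < P.length := by
  induction P using List.reverseRecOn with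
  | nil => intro p hp; simp [pvLast] at hp
  | append_singleton Q e ih =>
    intro p hp
    rw [pvLast_append] at hp
    rcases hG : pvG e t with _ | r
    · rw [hG] at hp
      obtain ⟨h1, h2⟩ := ih p hp
      simp only [List.length_append, List.length_cons, List.length_nil]
      omega
    · rw [hG] at hp
      simp only [Option.some.injEq] at hp
      subst hp
      simp only [List.length_append, List.length_cons, List.length_nil]
      omega

theorem pvScan_all_none (s : List (Option Int)) (h : ∀ x ∈ s, x = none) :
    pvScan s = (none, 0) := by
  induction s with
  | nil => rfl
  | cons x s' ih =>
    have hx : x = none := h x (by simp)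
    subst hx
    have : pvScan (none :: s') = pvScan s' := by unfold pvScan; simp
    rw [this]
    exact ih (fun x hx => h x (by simp [hx]))

theorem pvS_append (P : List (List (String × List (String × List (String × Int)))))
    (e : List (String × List (String × List (String × Int)))) :
    pvS (P ++ [e]) = PySem.Set.update (pvS P) ((pvAsg e).map (·.1)) := by
  unfold pvS; rw [List.foldl_append]; rfl

theorem mem_pvS_aux (t : String) :
    ∀ (P : List (List (String × List (String × List (String × Int))))) (s : PySem.Set String),
    (t ∈ P.foldl (fun s e => PySem.Set.update s ((pvAsg e).map (·.1))) s ↔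
      t ∈ s ∨ ∃ e ∈ P, t ∈ (pvAsg e).map (·.1)) := by
  intro P
  induction P with
  | nil => simp
  | cons e P' ih =>
    intro s
    rw [List.foldl_cons, ih, PySem.Set.mem_update]
    simp only [List.mem_cons]
    constructor
    · rintro ((h | h) | ⟨e', he', h⟩)
      · exact Or.inl h
      · exact Or.inr ⟨e, Or.inl rfl, h⟩
      · exact Or.inr ⟨e', Or.inr he', h⟩
    · rintro (h | ⟨e', (rfl | he'), h⟩)
      · exact Or.inl (Or.inl h)
      · exact Or.inl (Or.inr h)
      · exact Or.inr ⟨e', he', h⟩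

theorem mem_pvS (t : String) (P : List (List (String × List (String × List (String × Int))))) :
    t ∈ pvS P ↔ ∃ e ∈ P, t ∈ (pvAsg e).map (·.1) := by
  unfold pvS; rw [mem_pvS_aux]; simp

theorem pvS_nodup_aux :
    ∀ (P : List (List (String × List (String × List (String × Int))))) (s : PySem.Set String),
    s.Nodup → (P.foldl (fun s e => PySem.Set.update s ((pvAsg e).map (·.1))) s).Nodup := by
  intro P
  induction P with
  | nil => intro s hs; simpa using hs
  | cons e P' ih => intro s hs; exact ih _ (PySem.Set.nodup_update _ _ hs)

theorem pvS_nodup (P : List (List (String × List (String × List (String × Int))))) :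
    (pvS P).Nodup := pvS_nodup_aux P [] List.nodup_nil

theorem pvCnt_zero_of_not_mem (t : String) (P : List (List (String × List (String × List (String × Int)))))
    (h : t ∉ pvS P) : (pvScan (P.map (fun e => pvG e t))).2 = 0 := by
  have hall : ∀ x ∈ P.map (fun e => pvG e t), x = none := by
    intro x hx
    obtain ⟨e, he, rfl⟩ := List.mem_map.1 hx
    by_contra hne
    have : t ∈ (pvAsg e).map (·.1) := by
      by_contra hmem
      exact hne (pvG_eq_none_of_not_mem e t hmem)
    exact h ((mem_pvS t P).2 ⟨e, he, this⟩)
  rw [pvScan_all_none _ hall]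

theorem pv_sum_filter (f : String → Int) :
    ∀ l : List String, ((l.filter (fun t => !decide (f t = 0))).map f).sum = (l.map f).sum := by
  intro l
  induction l with
  | nil => rfl
  | cons a l' ih =>
    by_cases h : f a = 0
    · simp [List.filter_cons, h, ih]
    · simp [List.filter_cons, h, ih]

theorem pv_sum_support (f : String → Int) (l₁ l₂ : List String) (h₁ : l₁.Nodup) (h₂ : l₂.Nodup)
    (hs : ∀ t, f t ≠ 0 → (t ∈ l₁ ∧ t ∈ l₂)) : (l₁.map f).sum = (l₂.map f).sum := by
  rw [← pv_sum_filter f l₁, ← pv_sum_filter f l₂]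
  have hperm : List.Perm (l₁.filter (fun t => !decide (f t = 0))) (l₂.filter (fun t => !decide (f t = 0))) := by
    rw [List.perm_ext_iff_of_nodup (h₁.filter _) (h₂.filter _)]
    intro a
    simp only [List.mem_filter, Bool.not_eq_true', decide_eq_false_iff_not]
    constructor
    · rintro ⟨_, ha⟩; exact ⟨(hs a ha).2, ha⟩
    · rintro ⟨_, ha⟩; exact ⟨(hs a ha).1, ha⟩
  exact (hperm.map f).sum_eq

theorem pvScanFst_iff (P : List (List (String × List (String × List (String × Int))))) (t : String) (r : Int) :
    (pvScan (P.map (fun e => pvG e t))).1 = some r ↔ pvLast P t = some ((P.length : Int) - 1, r) := by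
  induction P using List.reverseRecOn with
  | nil => simp [pvScan, pvLast, PySem.List.enumerate_nil]
  | append_singleton Q e' _ =>
    have h1 : (Q ++ [e']).map (fun e => pvG e t) = Q.map (fun e => pvG e t) ++ [pvG e' t] := by simp
    rw [h1, pvScan_append, pvLast_append]
    have hlen : ((Q ++ [e']).length : Int) - 1 = (Q.length : Int) := by simp
    rw [hlen]
    rcases hG : pvG e' t with _ | r'
    · simp only []
      constructor
      · intro h; cases h
      · intro h
        have := (pvLast_bounds Q t _ h).2
        simp at this
    · simp only [Option.some.injEq, Prod.mk.injEq]
      constructor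
      · intro h; exact ⟨trivial, h⟩
      · intro h; exact h.2

theorem pvInd_eq_pvBInd (P : List (List (String × List (String × List (String × Int)))))
    (e : List (String × List (String × List (String × Int)))) (d : PySem.Dict String (Int × Int)) (t : String)
    (hd : d.get? t = pvLast P t) :
    pvInd e (P.length : Int) d t = pvBInd (pvScan (P.map (fun e' => pvG e' t))).1 (pvG e t) := by
  unfold pvInd pvBInd
  rw [hd]
  rcases hG : pvG e t with _ | rid
  · rcases pvLast P t with _ | p <;> simp
  · rcases hL : pvLast P t with _ | p
    · have hF : (pvScan (P.map (fun e' => pvG e' t))).1 = none := by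
        rcases hF' : (pvScan (P.map (fun e' => pvG e' t))).1 with _ | r0
        · rfl
        · have := (pvScanFst_iff P t r0).1 hF'
          rw [hL] at this; cases this
      simp [hF]
    · by_cases hp : p.1 = (P.length : Int) - 1
      · have hF : (pvScan (P.map (fun e' => pvG e' t))).1 = some p.2 := by
          apply (pvScanFst_iff P t p.2).2
          rw [hL, ← hp]
        rw [hF]
        simp only [ne_eq, Option.some.injEq, reduceCtorEq, not_false_eq_true, true_and]
        split_ifs with h1 h2 h2 <;> first | rfl | (exfalso; tauto)
      · have hF : (pvScan (P.map (fun e' => pvG e' t))).1 = none := by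
          rcases hF' : (pvScan (P.map (fun e' => pvG e' t))).1 with _ | r0
          · rfl
          · have := (pvScanFst_iff P t r0).1 hF'
            rw [hL] at this
            simp only [Option.some.injEq] at this
            exact absurd (congrArg Prod.fst this) hp
        rw [hF]
        simp only [ne_eq, not_true_eq_false, false_and, if_false]
        split_ifs with h1 <;> first | rfl | (exfalso; exact hp h1.1)

theorem pvSum_append (P : List (List (String × List (String × List (String × Int)))))
    (e : List (String × List (String × List (String × Int)))) (d : PySem.Dict String (Int × Int))
    (hd : ∀ t, d.get? t = pvLast P t) :
    pvSum (P ++ [e]) = pvSum P +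
      ((PySem.List.dedup ((pvAsg e).map (·.1))).map (pvInd e (P.length : Int) d)).sum := by
  have hmap : ∀ t : String, (P ++ [e]).map (fun e' => pvG e' t) = P.map (fun e' => pvG e' t) ++ [pvG e t] :=
    fun t => by simp
  unfold pvSum
  rw [pvS_append]
  have hcongr : ∀ t ∈ PySem.Set.update (pvS P) ((pvAsg e).map (·.1)),
      (fun t => (pvScan ((P ++ [e]).map (fun e' => pvG e' t))).2) t
      = (fun t => (pvScan (P.map (fun e' => pvG e' t))).2 + pvBInd (pvScan (P.map (fun e' => pvG e' t))).1 (pvG e t)) t := by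
    intro t _
    simp only []
    rw [hmap t, pvScan_append]
  rw [List.map_congr_left hcongr, PySem.List.sum_map_add_int]
  have hndS' : (PySem.Set.update (pvS P) ((pvAsg e).map (·.1))).Nodup :=
    PySem.Set.nodup_update _ _ (pvS_nodup P)
  congr 1
  · apply pv_sum_support _ _ _ hndS' (pvS_nodup P)
    intro t ht
    have htP : t ∈ pvS P := by
      by_contra hmem
      exact ht (pvCnt_zero_of_not_mem t P hmem)
    exact ⟨(PySem.Set.mem_update _ _ _).2 (Or.inl htP), htP⟩
  · have hstep : ((PySem.Set.update (pvS P) ((pvAsg e).map (·.1))).map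
        (fun t => pvBInd (pvScan (P.map (fun e' => pvG e' t))).1 (pvG e t))).sum
      = ((PySem.List.dedup ((pvAsg e).map (·.1))).map
        (fun t => pvBInd (pvScan (P.map (fun e' => pvG e' t))).1 (pvG e t))).sum := by
      apply pv_sum_support _ _ _ hndS' (PySem.List.nodup_dedup _)
      intro t ht
      have hGt : pvG e t ≠ none := by
        unfold pvBInd at ht
        by_contra hn
        simp [hn] at ht
      have hkeys : t ∈ (pvAsg e).map (·.1) := by
        by_contra hmem
        exact hGt (pvG_eq_none_of_not_mem e t hmem)
      exact ⟨(PySem.Set.mem_update _ _ _).2 (Or.inr hkeys), (PySem.List.mem_dedup _ _).2 hkeys⟩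
    rw [hstep]
    congr 1
    apply List.map_congr_left
    intro t _
    exact (pvInd_eq_pvBInd P e d t (hd t)).symm

def pvOuterStep (st : Int × PySem.Dict String (Int × Int))
    (ie : Int × List (String × List (String × List (String × Int)))) : Int × PySem.Dict String (Int × Int) :=
  (PySem.List.dedup ((pvAsg ie.2).map (·.1))).foldl (pvInnerStep (pvAsg ie.2) ie.1) st

theorem pvB_invariant (ah : List (List (String × List (String × List (String × Int))))) :
    (((PySem.List.enumerate ah 0).foldl pvOuterStep (0, PySem.Dict.empty)).1 = pvSum ah) ∧
    (∀ t, ((PySem.List.enumerate ah 0).foldl pvOuterStep (0, PySem.Dict.empty)).2.get? t = pvLast ah t) := by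
  induction ah using List.reverseRecOn with
  | nil =>
    constructor
    · rfl
    · intro t; rfl
  | append_singleton P e ih =>
    obtain ⟨ih1, ih2⟩ := ih
    rw [PySem.List.enumerate_append, List.foldl_append]
    rcases hst : (PySem.List.enumerate P 0).foldl pvOuterStep (0, PySem.Dict.empty) with ⟨n, d⟩
    rw [hst] at ih1 ih2
    dsimp only at ih1 ih2
    simp only [PySem.List.enumerate_cons, PySem.List.enumerate_nil, List.foldl_cons, List.foldl_nil,
      zero_add]
    have hK := pvInner_spec e (P.length : Int) (PySem.List.dedup ((pvAsg e).map (·.1)))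
      (PySem.List.nodup_dedup _) (fun t ht => (PySem.List.mem_dedup _ _).1 ht) n d
    obtain ⟨hK1, hK2⟩ := hK
    have houter : pvOuterStep (n, d) ((P.length : Int), e) =
        (PySem.List.dedup ((pvAsg e).map (·.1))).foldl (pvInnerStep (pvAsg e) (P.length : Int)) (n, d) := rfl
    rw [houter]
    constructor
    · rw [hK1, ih1]
      exact (pvSum_append P e d ih2).symm
    · intro t
      rw [hK2 t, pvLast_append]
      by_cases htK : t ∈ PySem.List.dedup ((pvAsg e).map (·.1))
      · rw [if_pos htK]
        rcases hG : pvG e t with _ | r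
        · rw [ih2 t]
        · rfl
      · rw [if_neg htK]
        have hG : pvG e t = none := by
          apply pvG_eq_none_of_not_mem
          intro hmem
          exact htK ((PySem.List.mem_dedup _ _).2 hmem)
        rw [hG, ih2 t]

theorem pvB_eq_pvSum (ah : List (List (String × List (String × List (String × Int))))) :
    calculate_total_radar_switches_alt ah = pvSum ah := by
  have h : calculate_total_radar_switches_alt ah =
      ((PySem.List.enumerate ah 0).foldl pvOuterStep (0, PySem.Dict.empty)).1 := rfl
  rw [h, (pvB_invariant ah).1]

theorem pv_items_foldl_insert (v : String → List (Option Int)) :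
    ∀ (l : List String) (d : PySem.Dict String (List (Option Int))), l.Nodup →
    (∀ t ∈ l, d.contains t = false) →
    (l.foldl (fun m tid => m.insert tid (v tid)) d).items = d.items ++ l.map (fun t => (t, v t)) := by
  intro l
  induction l with
  | nil => intro d _ _; simp
  | cons t0 l' ih =>
    intro d hnd hc
    have hnd' : l'.Nodup := hnd.of_cons
    have ht0 : t0 ∉ l' := by simp at hnd; exact hnd.1
    rw [List.foldl_cons, ih (d.insert t0 (v t0)) hnd' ?_]
    · rw [PySem.Dict.items_insert_of_not_contains _ _ (hc t0 (by simp))]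
      simp
    · intro t ht
      have hne : t ≠ t0 := fun h => ht0 (h ▸ ht)
      rw [PySem.Dict.contains_insert]
      simp [hne, hc t (by simp [ht])]

theorem pvA_eq_pvSum (ah : List (List (String × List (String × List (String × Int))))) :
    calculate_total_radar_switches ah = pvSum ah := by
  by_cases h0 : ah = []
  · subst h0; rfl
  · unfold calculate_total_radar_switches
    rw [if_neg h0]
    dsimp only
    have hfun1 : (fun (s : PySem.Set String) entry =>
        match (PySem.Dict.mk entry).get? "assignments" with
        | some asg => if asg ≠ [] then PySem.Set.update s (PySem.Dict.mk asg).keys else s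
        | none => s)
      = (fun (s : PySem.Set String) e => PySem.Set.update s ((pvAsg e).map (·.1))) := by
      funext s e
      rcases hg : (PySem.Dict.mk e).get? "assignments" with _ | asg
      · simp [pvAsg, hg, PySem.Set.update_nil]
      · by_cases ha : asg = []
        · subst ha; simp [pvAsg, hg, PySem.Set.update_nil]
        · simp [pvAsg, hg, ha, PySem.Dict.keys]
    rw [hfun1]
    have hpvs : ah.foldl (fun (s : PySem.Set String) e => PySem.Set.update s ((pvAsg e).map (·.1))) PySem.Set.empty = pvS ah := rfl
    rw [hpvs]
    by_cases hS : pvS ah = []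
    · rw [if_pos hS]
      unfold pvSum
      rw [hS]
      rfl
    · rw [if_neg hS]
      have hfun2 : ∀ tid : String,
          ah.foldl (fun sq entry =>
            let asg := ((PySem.Dict.mk entry).get? "assignments").getD []
            match (PySem.Dict.mk asg).get? tid with
            | some details =>
                if details ≠ [] ∧ (PySem.Dict.mk details).contains "radar_id" then
                  sq ++ [some (((PySem.Dict.mk details).get? "radar_id").getD 0)]
                else sq ++ [none]
            | none => sq ++ [none]) []
          = ah.map (fun e => pvG e tid) := by
        intro tid
        have heq : (fun (sq : List (Option Int)) entry =>
            let asg := ((PySem.Dict.mk entry).get? "assignments").getD []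
            match (PySem.Dict.mk asg).get? tid with
            | some details =>
                if details ≠ [] ∧ (PySem.Dict.mk details).contains "radar_id" then
                  sq ++ [some (((PySem.Dict.mk details).get? "radar_id").getD 0)]
                else sq ++ [none]
            | none => sq ++ [none])
          = (fun (sq : List (Option Int)) e => sq ++ [pvG e tid]) := by
          funext sq e
          unfold pvG pvAsg
          dsimp only
          rcases hg : (PySem.Dict.mk (((PySem.Dict.mk e).get? "assignments").getD [])).get? tid with _ | details
          · rfl
          · show (if details ≠ [] ∧ (PySem.Dict.mk details).contains "radar_id" then
                sq ++ [some (((PySem.Dict.mk details).get? "radar_id").getD 0)] else sq ++ [none])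
              = sq ++ [(if details ≠ [] ∧ (PySem.Dict.mk details).contains "radar_id" then
                some (((PySem.Dict.mk details).get? "radar_id").getD 0) else none)]
            split_ifs <;> rfl
        rw [heq, PySem.List.foldl_append_singleton_eq_map]
        simp
      have hfun3 : (fun (m : PySem.Dict String (List (Option Int))) tid =>
          m.insert tid (ah.foldl (fun sq entry =>
            let asg := ((PySem.Dict.mk entry).get? "assignments").getD []
            match (PySem.Dict.mk asg).get? tid with
            | some details =>
                if details ≠ [] ∧ (PySem.Dict.mk details).contains "radar_id" then
                  sq ++ [some (((PySem.Dict.mk details).get? "radar_id").getD 0)]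
                else sq ++ [none]
            | none => sq ++ [none]) []))
        = (fun (m : PySem.Dict String (List (Option Int))) tid =>
          m.insert tid (ah.map (fun e => pvG e tid))) := by
        funext m tid
        rw [hfun2 tid]
      rw [hfun3]
      have hitems : ((pvS ah).foldl (fun (m : PySem.Dict String (List (Option Int))) tid =>
          m.insert tid (ah.map (fun e => pvG e tid))) PySem.Dict.empty).items
          = (pvS ah).map (fun t => (t, ah.map (fun e => pvG e t))) := by
        rw [pv_items_foldl_insert _ _ _ (pvS_nodup ah) (fun t _ => PySem.Dict.contains_empty t)]
        rfl
      rw [hitems]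
      have hfold : ((pvS ah).map (fun t => (t, ah.map (fun e => pvG e t)))).foldl
          (fun (total : Int) (p : String × List (Option Int)) =>
            total + (p.2.foldl (fun (st : Option Int × Int) cur =>
              (cur, if st.1 ≠ none ∧ cur ≠ none ∧ st.1 ≠ cur then st.2 + 1 else st.2)) (none, 0)).2) 0
          = 0 + (((pvS ah).map (fun t => (t, ah.map (fun e => pvG e t)))).map
              (fun p => (pvScan p.2).2)).sum := by
        exact PySem.List.foldl_add _ _ _
      rw [hfold]
      unfold pvSum
      rw [List.map_map]
      simp only [Function.comp_def]
      rw [zero_add]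

-- ===== VERDICT (by name: the statement is the Claim_ definition above) =====
theorem calculate_total_radar_switches_spec : Claim_equal_calculate_total_radar_switches := by
  intro ah _ _
  unfold Spec_calculate_total_radar_switches
  rw [pvA_eq_pvSum, pvB_eq_pvSum]
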